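-- pv_equiv track=rewrite | github.com/eejohnson7/simple-looping-in-python | unit_2/product_of_odd.py | solution
-- ===== SOURCE A (Python) =====
-- def solution(n):
--     # TODO: implement
--     odds = []
--
--     while n > 0:
--         digit = n % 10
--
--         if digit % 2 != 0:
--             odds.append(digit)
--
--         n = n // 10
--
--     if odds == []:
--         return 0
--
--     product = 1
--     for odd in odds:
--         product = product * odd
--
--     return product
-- ===== SOURCE B (Python) =====
-- def _go(n, prod, found):
--     # single-pass tail recursion: multiply odd digits into prod; found tracks whether any odd digit occurred
--     if n <= 0:
--         return prod if found else 0
--     d = n % 10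
--     if d % 2 != 0:
--         return _go(n // 10, prod * d, True)
--     return _go(n // 10, prod, found)
--
-- def solution(n):
--     return _go(n, 1, False)
-- ===== Notes on version B (the rewrite author's own statement) =====
-- stated objective: simpler
-- what changed: Replaces A's two-phase approach (collect the odd digits into a list, then fold the list into a product) with a single tail-recursive pass that keeps a running product and a found flag, allocating no list and making one traversal.
import Mathlib
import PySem

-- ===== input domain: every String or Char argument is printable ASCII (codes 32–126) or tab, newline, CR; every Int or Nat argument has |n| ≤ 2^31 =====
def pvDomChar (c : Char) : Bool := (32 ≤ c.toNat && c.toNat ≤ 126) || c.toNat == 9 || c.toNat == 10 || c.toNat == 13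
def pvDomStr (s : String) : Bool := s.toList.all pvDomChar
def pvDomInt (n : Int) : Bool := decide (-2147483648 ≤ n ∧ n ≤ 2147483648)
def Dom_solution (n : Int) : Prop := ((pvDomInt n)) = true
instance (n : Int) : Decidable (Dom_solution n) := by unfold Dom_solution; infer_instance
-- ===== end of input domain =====

-- B replaces A's collect-then-fold with one tail-recursive pass keeping a running product and a found flag (simpler; same cost).

theorem pvFloordiv10_lt (n : Int) (h : 0 < n) :
    (PySem.Int.floordiv n 10).toNat < n.toNat := by
  rw [PySem.Int.floordiv_eq_ediv_of_pos (by omega)]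
  omega

-- ===== PORT A =====
def solutionLoop (n : Int) (odds : List Int) : List Int :=
  if h : n > 0 then
    let digit := PySem.Int.mod n 10
    solutionLoop (PySem.Int.floordiv n 10)
      (if PySem.Int.mod digit 2 ≠ 0 then odds ++ [digit] else odds)
  else odds
termination_by n.toNat
decreasing_by exact pvFloordiv10_lt n h

def solution (n : Int) : Int :=
  let odds := solutionLoop n []
  if odds = [] then 0
  else odds.foldl (fun product odd => product * odd) 1

-- ===== PORT B =====
def solutionGo (n prod : Int) (found : Bool) : Int :=
  if h : n > 0 then
    let d := PySem.Int.mod n 10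
    if PySem.Int.mod d 2 ≠ 0 then
      solutionGo (PySem.Int.floordiv n 10) (prod * d) true
    else
      solutionGo (PySem.Int.floordiv n 10) prod found
  else
    if found then prod else 0
termination_by n.toNat
decreasing_by all_goals exact pvFloordiv10_lt n h

def solution_alt (n : Int) : Int := solutionGo n 1 false

-- ===== PRECONDITION & SPEC =====
def Spec_solution (n : Int) (out : Int) : Prop := out = solution_alt n
instance (n : Int) (out : Int) : Decidable (Spec_solution n out) := by unfold Spec_solution; infer_instance

-- ===== CLAIM (what is proved, stated in full; the proofs are below) =====
def Claim_equal_solution : Prop := ∀ (n : Int), Dom_solution n → Spec_solution n (solution n)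

-- ===== LEMMAS AND PROOFS =====

theorem solutionLoop_acc_aux : ∀ (k : Nat) (n : Int), n.toNat = k → ∀ (acc : List Int),
    solutionLoop n acc = acc ++ solutionLoop n [] := by
  intro k
  induction k using Nat.strong_induction_on with
  | _ k ih =>
    intro n hk acc
    conv_lhs => rw [solutionLoop]
    conv_rhs => rw [solutionLoop]
    by_cases h : n > 0
    · simp only [h, dite_true]
      have hlt : (PySem.Int.floordiv n 10).toNat < k := hk ▸ pvFloordiv10_lt n h
      by_cases hd : PySem.Int.mod (PySem.Int.mod n 10) 2 ≠ 0
      · rw [if_pos hd, if_pos hd,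
          ih _ hlt _ rfl (acc ++ [PySem.Int.mod n 10]),
          ih _ hlt _ rfl ([] ++ [PySem.Int.mod n 10])]
        simp
      · rw [if_neg hd, if_neg hd, ih _ hlt _ rfl acc]
    · simp [h]

theorem solutionLoop_acc (n : Int) (acc : List Int) :
    solutionLoop n acc = acc ++ solutionLoop n [] :=
  solutionLoop_acc_aux n.toNat n rfl acc

theorem solutionGo_eq : ∀ (k : Nat) (n : Int), n.toNat = k → ∀ (prod : Int) (found : Bool),
    solutionGo n prod found =
      if solutionLoop n [] = [] then (if found then prod else 0)
      else prod * (solutionLoop n []).prod := by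
  intro k
  induction k using Nat.strong_induction_on with
  | _ k ih =>
    intro n hk prod found
    rw [solutionGo]
    conv_rhs => rw [solutionLoop]
    by_cases h : n > 0
    · simp only [h, dite_true]
      have hlt : (PySem.Int.floordiv n 10).toNat < k := hk ▸ pvFloordiv10_lt n h
      by_cases hd : PySem.Int.mod (PySem.Int.mod n 10) 2 ≠ 0
      · rw [if_pos hd, if_pos hd, ih _ hlt _ rfl,
          solutionLoop_acc (PySem.Int.floordiv n 10) ([] ++ [PySem.Int.mod n 10])]
        by_cases he : solutionLoop (PySem.Int.floordiv n 10) [] = []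
        · simp only [he]
          simp
        · simp only [he]
          simp [mul_assoc]
      · rw [if_neg hd, if_neg hd, ih _ hlt _ rfl]
    · simp [h]

-- ===== VERDICT (by name: the statement is the Claim_ definition above) =====
theorem solution_spec : Claim_equal_solution := by
  intro n _
  unfold Spec_solution solution solution_alt
  rw [solutionGo_eq _ n rfl]
  by_cases he : solutionLoop n [] = []
  · simp [he]
  · simp only [he, if_false]
    rw [one_mul, ← List.prod_eq_foldl]
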